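-- pv_equiv track=rewrite | github.com/Kuree/cgra_pnr | mock/generate_hardware.py | determine_io_pos
-- ===== SOURCE A (Python) =====
-- def determine_io_pos(num_io, pe_margin, size):
--     io_pos = set()
--     for i in range(num_io):
--         offset = i // 8
--         if i % 4 == 0:
--             # top left corner. e.g., (1, 2) and (2, 1)
--             # when margin is 2, and size is 16
--             if i % 8 == 4:
--                 io_pos.add((pe_margin - 1, pe_margin + offset))
--             else:
--                 io_pos.add((pe_margin + offset, pe_margin - 1))
--         elif i % 4 == 1:
--             # top right corner. e.g. (18, 2) and (17, 1)
--             # when margin is 2, and size is 16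
--             if i % 8 == 5:
--                 io_pos.add((pe_margin + size - 1 - offset, pe_margin - 1))
--             else:
--                 io_pos.add((pe_margin + size, pe_margin + offset))
--         elif i % 4 == 2:
--             # bottom left corner. e.g. (2, 18) and (1, 17)
--             # when margin is 2, and size is 16
--             if i % 8 == 6:
--                 io_pos.add((pe_margin + offset, pe_margin + size))
--             else:
--                 io_pos.add((pe_margin - 1, pe_margin + size - offset - 1))
--         elif i % 4 == 3:
--             # bottom right corner. e.g. (18, 17) and (17, 18)
--             # when margin is 2 and size is 16
--             if i % 8 == 7:
--                 io_pos.add((pe_margin + size - 1 - offset, pe_margin + size))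
--             else:
--                 io_pos.add((pe_margin + size, pe_margin + size - offset - 1))
--     return io_pos
-- ===== SOURCE B (Python) =====
-- def determine_io_pos(num_io, pe_margin, size):
--     # ring-by-ring: each round r contributes one fixed list of 8 perimeter
--     # coordinates (the r-th "ring"); the last round is truncated.
--     m, s = pe_margin, size
--     io_pos = set()
--     for r in range((num_io + 7) // 8):
--         ring = [(m + r, m - 1), (m + s, m + r),
--                 (m - 1, m + s - r - 1), (m + s, m + s - r - 1),
--                 (m - 1, m + r), (m + s - 1 - r, m - 1),
--                 (m + r, m + s), (m + s - 1 - r, m + s)]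
--         io_pos.update(ring[:num_io - 8 * r])
--     return io_pos
-- ===== Notes on version B (the rewrite author's own statement) =====
-- stated objective: simpler
-- what changed: B generates the IO positions ring by ring: each round contributes one fixed literal list of the 8 perimeter coordinates (truncated on the last round) added to the set in order, replacing A's per-index i%4/i%8 two-level branch cascade with per-index offset arithmetic.
import Mathlib
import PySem

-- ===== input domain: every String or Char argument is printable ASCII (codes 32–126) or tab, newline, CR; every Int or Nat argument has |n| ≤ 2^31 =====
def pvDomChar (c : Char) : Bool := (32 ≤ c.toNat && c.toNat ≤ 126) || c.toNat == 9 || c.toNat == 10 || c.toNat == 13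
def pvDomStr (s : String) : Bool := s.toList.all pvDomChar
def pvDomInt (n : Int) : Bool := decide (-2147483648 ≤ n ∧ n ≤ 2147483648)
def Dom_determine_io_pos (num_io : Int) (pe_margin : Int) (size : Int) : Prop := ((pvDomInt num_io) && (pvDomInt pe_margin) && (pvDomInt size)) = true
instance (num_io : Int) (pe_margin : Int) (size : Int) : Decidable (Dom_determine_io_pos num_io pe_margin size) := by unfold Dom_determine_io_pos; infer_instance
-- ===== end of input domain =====

-- B builds the IO positions ring by ring (one fixed 8-coordinate perimeter ring per round,
-- last round truncated) instead of A's per-index i%4/i%8 branch cascade; objective: simpler.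

-- ===== PORT A =====
def determine_io_pos (num_io : Int) (pe_margin : Int) (size : Int) : List (Int × Int) :=
  (PySem.List.pyRange 0 num_io 1).foldl (fun io_pos i =>
    let offset := PySem.Int.floordiv i 8
    if PySem.Int.mod i 4 = 0 then
      if PySem.Int.mod i 8 = 4 then
        PySem.Set.add io_pos (pe_margin - 1, pe_margin + offset)
      else
        PySem.Set.add io_pos (pe_margin + offset, pe_margin - 1)
    else if PySem.Int.mod i 4 = 1 then
      if PySem.Int.mod i 8 = 5 then
        PySem.Set.add io_pos (pe_margin + size - 1 - offset, pe_margin - 1)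
      else
        PySem.Set.add io_pos (pe_margin + size, pe_margin + offset)
    else if PySem.Int.mod i 4 = 2 then
      if PySem.Int.mod i 8 = 6 then
        PySem.Set.add io_pos (pe_margin + offset, pe_margin + size)
      else
        PySem.Set.add io_pos (pe_margin - 1, pe_margin + size - offset - 1)
    else if PySem.Int.mod i 4 = 3 then
      if PySem.Int.mod i 8 = 7 then
        PySem.Set.add io_pos (pe_margin + size - 1 - offset, pe_margin + size)
      else
        PySem.Set.add io_pos (pe_margin + size, pe_margin + size - offset - 1)
    else io_pos) PySem.Set.empty

-- ===== PORT B =====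
-- the r-th perimeter ring of 8 coordinates (B's `ring` list literal)
def pvRing (m s r : Int) : List (Int × Int) :=
  [(m + r, m - 1), (m + s, m + r),
   (m - 1, m + s - r - 1), (m + s, m + s - r - 1),
   (m - 1, m + r), (m + s - 1 - r, m - 1),
   (m + r, m + s), (m + s - 1 - r, m + s)]

def determine_io_pos_alt (num_io : Int) (pe_margin : Int) (size : Int) : List (Int × Int) :=
  (PySem.List.pyRange 0 (PySem.Int.floordiv (num_io + 7) 8) 1).foldl (fun io_pos r =>
    PySem.Set.update io_pos
      (PySem.List.slice (pvRing pe_margin size r) none (some (num_io - 8 * r))))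
    PySem.Set.empty

-- ===== PRECONDITION & SPEC =====
def Spec_determine_io_pos (num_io : Int) (pe_margin : Int) (size : Int) (out : List (Int × Int)) : Prop := out = determine_io_pos_alt num_io pe_margin size
instance (num_io : Int) (pe_margin : Int) (size : Int) (out : List (Int × Int)) : Decidable (Spec_determine_io_pos num_io pe_margin size out) := by unfold Spec_determine_io_pos; infer_instance

-- ===== CLAIM (what is proved, stated in full; the proofs are below) =====
def Claim_equal_determine_io_pos : Prop := ∀ (num_io : Int) (pe_margin : Int) (size : Int), Dom_determine_io_pos num_io pe_margin size → Spec_determine_io_pos num_io pe_margin size (determine_io_pos num_io pe_margin size)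

-- ===== LEMMAS AND PROOFS =====

-- the coordinate A's loop body adds for index i
def gAux (m s i : Int) : Int × Int :=
  let offset := PySem.Int.floordiv i 8
  if PySem.Int.mod i 4 = 0 then
    (if PySem.Int.mod i 8 = 4 then (m - 1, m + offset) else (m + offset, m - 1))
  else if PySem.Int.mod i 4 = 1 then
    (if PySem.Int.mod i 8 = 5 then (m + s - 1 - offset, m - 1) else (m + s, m + offset))
  else if PySem.Int.mod i 4 = 2 then
    (if PySem.Int.mod i 8 = 6 then (m + offset, m + s) else (m - 1, m + s - offset - 1))
  else
    (if PySem.Int.mod i 8 = 7 then (m + s - 1 - offset, m + s) else (m + s, m + s - offset - 1))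

lemma stepA_eq (m s : Int) (st : PySem.Set (Int × Int)) (i : Int) :
    (let offset := PySem.Int.floordiv i 8
     if PySem.Int.mod i 4 = 0 then
       if PySem.Int.mod i 8 = 4 then PySem.Set.add st (m - 1, m + offset)
       else PySem.Set.add st (m + offset, m - 1)
     else if PySem.Int.mod i 4 = 1 then
       if PySem.Int.mod i 8 = 5 then PySem.Set.add st (m + s - 1 - offset, m - 1)
       else PySem.Set.add st (m + s, m + offset)
     else if PySem.Int.mod i 4 = 2 then
       if PySem.Int.mod i 8 = 6 then PySem.Set.add st (m + offset, m + s)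
       else PySem.Set.add st (m - 1, m + s - offset - 1)
     else if PySem.Int.mod i 4 = 3 then
       if PySem.Int.mod i 8 = 7 then PySem.Set.add st (m + s - 1 - offset, m + s)
       else PySem.Set.add st (m + s, m + s - offset - 1)
     else st) = PySem.Set.add st (gAux m s i) := by
  have h0 := PySem.Int.mod_nonneg i (show (0:Int) < 4 by norm_num)
  have h1 := PySem.Int.mod_lt i (show (0:Int) < 4 by norm_num)
  unfold gAux
  split_ifs <;> first | rfl | omega

lemma gAux_eval (m s r j : Int) (h0 : 0 ≤ j) (h8 : j < 8) :
    gAux m s (8*r + j) =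
      if j = 0 then (m + r, m - 1)
      else if j = 1 then (m + s, m + r)
      else if j = 2 then (m - 1, m + s - r - 1)
      else if j = 3 then (m + s, m + s - r - 1)
      else if j = 4 then (m - 1, m + r)
      else if j = 5 then (m + s - 1 - r, m - 1)
      else if j = 6 then (m + r, m + s)
      else (m + s - 1 - r, m + s) := by
  simp only [gAux,
    PySem.Int.mod_eq_emod_of_pos (show (0:Int) < 4 by norm_num),
    PySem.Int.mod_eq_emod_of_pos (show (0:Int) < 8 by norm_num),
    PySem.Int.floordiv_eq_ediv_of_pos (show (0:Int) < 8 by norm_num)]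
  have hd : (8*r + j) / 8 = r := by omega
  have h4 : (8*r + j) % 4 = j % 4 := by omega
  have h8' : (8*r + j) % 8 = j := by omega
  rw [hd, h4, h8']
  interval_cases j <;> norm_num
lemma map_gAux_full (m s r : Int) :
    (PySem.List.pyRange (8*r) (8*r+8) 1).map (gAux m s) = pvRing m s r := by
  rw [PySem.List.pyRange_one, show ((8*r+8) - 8*r).toNat = 8 by omega,
      show List.range 8 = [0,1,2,3,4,5,6,7] from rfl]
  simp only [List.map_cons, List.map_nil]
  push_cast
  rw [gAux_eval m s r 0 (by norm_num) (by norm_num), gAux_eval m s r 1 (by norm_num) (by norm_num),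
      gAux_eval m s r 2 (by norm_num) (by norm_num), gAux_eval m s r 3 (by norm_num) (by norm_num),
      gAux_eval m s r 4 (by norm_num) (by norm_num), gAux_eval m s r 5 (by norm_num) (by norm_num),
      gAux_eval m s r 6 (by norm_num) (by norm_num), gAux_eval m s r 7 (by norm_num) (by norm_num)]
  norm_num [pvRing]

lemma map_gAux_take (m s r : Int) (k : Nat) (hk : k ≤ 8) :
    (PySem.List.pyRange (8*r) (8*r + (k:Int)) 1).map (gAux m s) = (pvRing m s r).take k := by
  have h1 : PySem.List.pyRange (8*r) (8*r + (k:Int)) 1 = (PySem.List.pyRange (8*r) (8*r+8) 1).take k := by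
    rw [PySem.List.pyRange_one, PySem.List.pyRange_one, ← List.map_take, List.take_range]
    have : ((8*r + (k:Int)) - 8*r).toNat = min k ((8*r+8) - 8*r).toNat := by omega
    rw [this]
  rw [h1, List.map_take, map_gAux_full]

lemma slice_full (m s r b : Int) (hb : 8 ≤ b) :
    PySem.List.slice (pvRing m s r) none (some b) = pvRing m s r := by
  rw [PySem.List.slice_to (pvRing m s r) (by omega)]
  apply List.take_of_length_le
  simp [pvRing]; omega

lemma chunk (m s : Int) (R : Nat) : ∀ n : Int, 8*(R:Int) - 8 < n → n ≤ 8*(R:Int) →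
    (PySem.List.pyRange 0 n 1).map (gAux m s)
      = ((PySem.List.pyRange 0 (R:Int) 1).map
          (fun r => PySem.List.slice (pvRing m s r) none (some (n - 8*r)))).flatten := by
  induction R with
  | zero =>
    intro n h1 h2
    norm_num at h1 h2
    rw [PySem.List.pyRange_one_eq_nil h2]
    simp [PySem.List.pyRange_one_eq_nil]
  | succ R ih =>
    intro n h1 h2
    have hc : ((R+1 : Nat) : Int) = (R:Int) + 1 := by push_cast; ring
    rw [hc] at h1 h2
    have hsplit : PySem.List.pyRange 0 n 1
        = PySem.List.pyRange 0 (8*(R:Int)) 1 ++ PySem.List.pyRange (8*(R:Int)) n 1 :=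
      PySem.List.pyRange_one_append 0 (8*(R:Int)) n (by positivity) (by omega)
    rw [hsplit, List.map_append, hc, PySem.List.pyRange_one_succ_right (by positivity),
        List.map_append, List.flatten_append]
    congr 1
    · rw [ih (8*(R:Int)) (by omega) (by omega)]
      apply congrArg List.flatten
      apply List.map_congr_left
      intro r hr
      rw [PySem.List.mem_pyRange_one] at hr
      rw [slice_full _ _ _ _ (by omega), slice_full _ _ _ _ (by omega)]
    · obtain ⟨k, hk1, hk8, hn⟩ : ∃ k : Nat, 1 ≤ k ∧ k ≤ 8 ∧ n = 8*(R:Int) + k :=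
        ⟨(n - 8*(R:Int)).toNat, by omega, by omega, by omega⟩
      subst hn
      rw [map_gAux_take m s (R:Int) k hk8]
      simp only [List.map_cons, List.map_nil, List.flatten_cons, List.flatten_nil, List.append_nil,
        show (8*(R:Int) + (k:Int) - 8*(R:Int)) = (k:Int) by ring]
      rw [PySem.List.slice_to (pvRing m s (R:Int)) (by positivity), Int.toNat_natCast]

lemma portA_eq (n m s : Int) :
    determine_io_pos n m s
      = ((PySem.List.pyRange 0 n 1).map (gAux m s)).foldl PySem.Set.add PySem.Set.empty := by
  unfold determine_io_pos
  rw [funext fun st => funext fun i => stepA_eq m s st i, List.foldl_map]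

lemma portB_eq (n m s : Int) :
    determine_io_pos_alt n m s
      = (((PySem.List.pyRange 0 (PySem.Int.floordiv (n+7) 8) 1).map
            (fun r => PySem.List.slice (pvRing m s r) none (some (n - 8*r)))).flatten).foldl
          PySem.Set.add PySem.Set.empty := by
  unfold determine_io_pos_alt
  rw [List.foldl_flatten, List.foldl_map]
  rfl

-- ===== VERDICT (by name: the statement is the Claim_ definition above) =====
theorem determine_io_pos_spec : Claim_equal_determine_io_pos := by
  intro n m s _
  unfold Spec_determine_io_pos
  rw [portA_eq, portB_eq]
  have hfd : PySem.Int.floordiv (n+7) 8 = (n+7)/8 :=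
    PySem.Int.floordiv_eq_ediv_of_pos (by norm_num)
  by_cases hn : n ≤ 0
  · rw [PySem.List.pyRange_one_eq_nil hn, hfd, PySem.List.pyRange_one_eq_nil (by omega)]
    simp
  · obtain ⟨R, hR⟩ : ∃ R : Nat, (R:Int) = (n+7)/8 :=
      ⟨((n+7)/8).toNat, by omega⟩
    rw [hfd, ← hR, chunk m s R n (by omega) (by omega)]
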